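-- pv_equiv track=rewrite | github.com/simoesmiguel/autonomous-cars | main.py | create_paths
-- ===== SOURCE A (Python) =====
-- def create_paths(depart_coords, goal_coords):
--     depart=[0,0]
--     goal=[0,0]
--
--     depart[0] = int(depart_coords[0])
--     depart[1] = int(depart_coords[1])
--
--     goal[0] = int(goal_coords[0])
--     goal[1] = int(goal_coords[1])
--
--     final_path=[]
--
--     if(depart[0]==0):   # when agent departs from (0,150)
--         if(depart[1]==goal[1]): # from (0,350) to (800,350)
--             final_path=[(x,depart[1]) for x in range(depart[0], goal[0])]
--         else:
--             p1=[(x, depart[1]) for x in range(depart[0], goal[0])]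
--             if(depart[1]>goal[1]): #from (0,150) to (450,0)
--                 p2=[(goal[0], y) for y in range(depart[1], goal[1], -1)]
--             else:   #from (0,150) to (550,800)
--                 p2=[(goal[0], y) for y in range(depart[1], goal[1])]
--
--             final_path=p1+p2
--
--     elif(depart[0]==450): #when agent departs from (550,0)
--         if(depart[0]==goal[0]): #from (550,0) to (550,800)
--             final_path = [(depart[0],y) for y in range(depart[1],goal[1])]
--         else:
--             p1 = [(depart[0],y) for y in range(depart[1],goal[1])]
--             if(depart[0]>goal[0]): # from (550,0) to (0,250)
--                 p2=[(x, goal[1]) for x in range(depart[0], goal[0], -1)]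
--             else: #from (550,0)  to (800,150)
--                 p2 =[(x, goal[1]) for x in range(depart[0], goal[0])]
--
--             final_path =p1+p2
--     elif(depart[0] == 800): #when agent departs from (800,250):
--         if(depart[1] == goal[1]):
--             final_path = [(x,depart[1]) for x in range(depart[0], goal[0], -1)]
--         else:
--             p1= [(x,depart[1]) for x in range(depart[0], goal[0], -1)]
--             if(depart[1]>goal[1]): #from (800, 250) to (450,0)
--                 p2 =[(goal[0] , y) for y in range(depart[1], goal[1], -1)]
--             else:   # from (800, 250) to (550,800)
--                 p2 =[(goal[0], y) for y in range(depart[1], goal[1])]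
--             final_path =p1+p2
--     else: # when agent departs from (350, 800)
--         if(depart[0]==goal[0]):
--             final_path =[(depart[0], y) for y in range(depart[1], goal[1], -1)]
--         else:
--             p1=[(depart[0], y) for y in range(depart[1], goal[1], -1)]
--             if(depart[0]>goal[0]): # from (450, 800) to (0, 250)
--                 p2 =[(x, goal[1]) for x in range(depart[0], goal[0], -1)]
--             else:  # from (450, 800) to (800, 150)
--                 p2 =[(x, goal[1]) for x in range(depart[0], goal[0])]
--
--             final_path =p1+p2
--
--     final_path.append((goal[0],goal[1]))
--     return final_path
-- ===== SOURCE B (Python) =====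
-- def create_paths(depart_coords, goal_coords):
--     d0, d1 = int(depart_coords[0]), int(depart_coords[1])
--     g0, g1 = int(goal_coords[0]), int(goal_coords[1])
--     horiz_first = d0 in (0, 800)
--     s1 = 1 if d0 in (0, 450) else -1
--     if horiz_first:
--         a1, b1, f1 = d0, g0, d1   # leg 1 varies x at y = d1
--         a2, b2, f2 = d1, g1, g0   # leg 2 varies y at x = g0
--     else:
--         a1, b1, f1 = d1, g1, d0   # leg 1 varies y at x = d0
--         a2, b2, f2 = d0, g0, g1   # leg 2 varies x at y = g1
--     s2 = 1 if b2 >= a2 else -1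
--     n1 = max(0, (b1 - a1) * s1)
--     n2 = max(0, (b2 - a2) * s2)
--
--     def pt(i):
--         if i < n1:
--             v, f, on_leg1 = a1 + s1 * i, f1, True
--         elif i < n1 + n2:
--             v, f, on_leg1 = a2 + s2 * (i - n1), f2, False
--         else:
--             return (g0, g1)
--         if horiz_first == on_leg1:
--             return (v, f)
--         return (f, v)
--
--     return [pt(i) for i in range(n1 + n2 + 1)]
-- ===== Notes on version B (the rewrite author's own statement) =====
-- stated objective: alternative
-- what changed: B replaces A's eight-way tree of concatenated range comprehensions by arithmetic: it computes the two leg lengths in closed form (n1, n2) and emits the whole path as one comprehension over range(n1+n2+1) with an index-to-coordinate function, never concatenating lists.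
import Mathlib
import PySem

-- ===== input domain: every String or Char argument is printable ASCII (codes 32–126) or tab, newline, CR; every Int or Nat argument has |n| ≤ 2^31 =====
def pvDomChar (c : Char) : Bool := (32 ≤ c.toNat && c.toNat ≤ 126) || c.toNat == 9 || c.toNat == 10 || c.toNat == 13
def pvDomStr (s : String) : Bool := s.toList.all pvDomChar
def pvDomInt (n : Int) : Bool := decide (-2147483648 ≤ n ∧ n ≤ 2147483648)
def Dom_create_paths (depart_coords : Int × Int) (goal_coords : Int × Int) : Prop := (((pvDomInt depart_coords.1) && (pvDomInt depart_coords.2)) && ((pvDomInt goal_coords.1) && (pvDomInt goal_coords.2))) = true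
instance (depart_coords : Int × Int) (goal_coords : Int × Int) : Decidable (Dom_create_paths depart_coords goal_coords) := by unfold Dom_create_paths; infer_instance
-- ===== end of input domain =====

-- B computes the two leg lengths in closed form and emits the path as one indexed map over a single range (objective: alternative); return values equal on all inputs.


-- ===== PORT A =====
-- Port of A: literal transliteration of the eight-way if/elif tree of range comprehensions.
def create_paths (depart_coords : Int × Int) (goal_coords : Int × Int) : List (Int × Int) :=
  let depart0 := depart_coords.1
  let depart1 := depart_coords.2
  let goal0 := goal_coords.1
  let goal1 := goal_coords.2
  let final_path : List (Int × Int) :=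
    if depart0 = 0 then
      if depart1 = goal1 then
        (PySem.List.pyRange depart0 goal0 1).map (fun x => (x, depart1))
      else
        let p1 := (PySem.List.pyRange depart0 goal0 1).map (fun x => (x, depart1))
        let p2 :=
          if depart1 > goal1 then
            (PySem.List.pyRange depart1 goal1 (-1)).map (fun y => (goal0, y))
          else
            (PySem.List.pyRange depart1 goal1 1).map (fun y => (goal0, y))
        p1 ++ p2
    else if depart0 = 450 then
      if depart0 = goal0 then
        (PySem.List.pyRange depart1 goal1 1).map (fun y => (depart0, y))
      else
        let p1 := (PySem.List.pyRange depart1 goal1 1).map (fun y => (depart0, y))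
        let p2 :=
          if depart0 > goal0 then
            (PySem.List.pyRange depart0 goal0 (-1)).map (fun x => (x, goal1))
          else
            (PySem.List.pyRange depart0 goal0 1).map (fun x => (x, goal1))
        p1 ++ p2
    else if depart0 = 800 then
      if depart1 = goal1 then
        (PySem.List.pyRange depart0 goal0 (-1)).map (fun x => (x, depart1))
      else
        let p1 := (PySem.List.pyRange depart0 goal0 (-1)).map (fun x => (x, depart1))
        let p2 :=
          if depart1 > goal1 then
            (PySem.List.pyRange depart1 goal1 (-1)).map (fun y => (goal0, y))
          else
            (PySem.List.pyRange depart1 goal1 1).map (fun y => (goal0, y))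
        p1 ++ p2
    else
      if depart0 = goal0 then
        (PySem.List.pyRange depart1 goal1 (-1)).map (fun y => (depart0, y))
      else
        let p1 := (PySem.List.pyRange depart1 goal1 (-1)).map (fun y => (depart0, y))
        let p2 :=
          if depart0 > goal0 then
            (PySem.List.pyRange depart0 goal0 (-1)).map (fun x => (x, goal1))
          else
            (PySem.List.pyRange depart0 goal0 1).map (fun x => (x, goal1))
        p1 ++ p2
  final_path ++ [(goal0, goal1)]

-- ===== PORT B =====
-- Port of B's inner pt(i): index-to-coordinate function (the Python bool test 'horiz_first == on_leg1' is unfolded per branch).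
def ptB (hf : Bool) (a1 s1 f1 a2 s2 f2 n1 n2 g0 g1 : Int) (i : Int) : Int × Int :=
  if i < n1 then
    let v := a1 + s1 * i
    if hf then (v, f1) else (f1, v)
  else if i < n1 + n2 then
    let v := a2 + s2 * (i - n1)
    if hf then (f2, v) else (v, f2)
  else (g0, g1)

-- Port of B: closed-form leg lengths, one map over a single range.
def create_paths_alt (depart_coords : Int × Int) (goal_coords : Int × Int) : List (Int × Int) :=
  let d0 := depart_coords.1
  let d1 := depart_coords.2
  let g0 := goal_coords.1
  let g1 := goal_coords.2
  let hf : Bool := decide (d0 = 0 ∨ d0 = 800)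
  let s1 : Int := if d0 = 0 ∨ d0 = 450 then 1 else -1
  let a1 : Int := if hf then d0 else d1
  let b1 : Int := if hf then g0 else g1
  let f1 : Int := if hf then d1 else d0
  let a2 : Int := if hf then d1 else d0
  let b2 : Int := if hf then g1 else g0
  let f2 : Int := if hf then g0 else g1
  let s2 : Int := if b2 ≥ a2 then 1 else -1
  let n1 : Int := max 0 ((b1 - a1) * s1)
  let n2 : Int := max 0 ((b2 - a2) * s2)
  (PySem.List.pyRange 0 (n1 + n2 + 1) 1).map (ptB hf a1 s1 f1 a2 s2 f2 n1 n2 g0 g1)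

-- ===== PRECONDITION & SPEC =====
def Spec_create_paths (depart_coords : Int × Int) (goal_coords : Int × Int) (out : List (Int × Int)) : Prop := out = create_paths_alt depart_coords goal_coords
instance (depart_coords : Int × Int) (goal_coords : Int × Int) (out : List (Int × Int)) : Decidable (Spec_create_paths depart_coords goal_coords out) := by unfold Spec_create_paths; infer_instance

-- ===== CLAIM (what is proved, stated in full; the proofs are below) =====
def Claim_equal_create_paths : Prop := ∀ (depart_coords : Int × Int) (goal_coords : Int × Int), Dom_create_paths depart_coords goal_coords → Spec_create_paths depart_coords goal_coords (create_paths depart_coords goal_coords)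

-- ===== LEMMAS AND PROOFS =====

-- range(a, b, ±1) as a map over List.range, uniform in the step sign.
lemma pyRange_pm (a b s : Int) (hs : s = 1 ∨ s = -1) :
    PySem.List.pyRange a b s = (List.range ((b - a) * s).toNat).map (fun (k : Nat) => a + s * (k : Int)) := by
  rcases hs with rfl | rfl
  · rw [PySem.List.pyRange_one]
    have h : (b - a) * (1 : Int) = b - a := by ring
    rw [h]
    exact List.map_congr_left (fun k _ => by ring)
  · rw [PySem.List.pyRange_neg_one]
    have h : (b - a) * (-1 : Int) = a - b := by ring
    rw [h]
    exact List.map_congr_left (fun k _ => by ring)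

-- B's single indexed map splits into the two legs plus the goal point.
lemma B_split (hf : Bool) (a1 s1 f1 a2 s2 f2 g0 g1 b1 b2 n1 n2 : Int)
    (hs1 : s1 = 1 ∨ s1 = -1) (hs2 : s2 = 1 ∨ s2 = -1)
    (hn1 : n1 = max 0 ((b1 - a1) * s1)) (hn2 : n2 = max 0 ((b2 - a2) * s2)) :
    (PySem.List.pyRange 0 (n1 + n2 + 1) 1).map
        (ptB hf a1 s1 f1 a2 s2 f2 n1 n2 g0 g1)
      = (PySem.List.pyRange a1 b1 s1).map (fun v => if hf then (v, f1) else (f1, v))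
        ++ (PySem.List.pyRange a2 b2 s2).map (fun v => if hf then (f2, v) else (v, f2))
        ++ [(g0, g1)] := by
  subst hn1 hn2
  set m : Nat := ((b1 - a1) * s1).toNat with hm
  set n : Nat := ((b2 - a2) * s2).toNat with hn
  have hm' : max 0 ((b1 - a1) * s1) = (m : Int) := by omega
  have hn' : max 0 ((b2 - a2) * s2) = (n : Int) := by omega
  rw [hm', hn', pyRange_pm a1 b1 s1 hs1, pyRange_pm a2 b2 s2 hs2, ← hm, ← hn,
    PySem.List.pyRange_one]
  have hlen : ((m : Int) + n + 1 - 0).toNat = m + n + 1 := by omega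
  rw [hlen, List.range_succ, List.range_add]
  simp only [List.map_append, List.map_map, List.map_cons, List.map_nil, List.append_assoc]
  congr 1
  · apply List.map_congr_left
    intro k hk
    have hk' : (k : Int) < m := by exact_mod_cast List.mem_range.mp hk
    simp only [Function.comp, ptB]
    rw [if_pos (by omega)]
    cases hf <;> simp
  congr 1
  · apply List.map_congr_left
    intro k hk
    have hk' : (k : Int) < n := by exact_mod_cast List.mem_range.mp hk
    simp only [Function.comp, ptB]
    rw [if_neg (by push_cast; omega), if_pos (by push_cast; omega)]
    cases hf <;> simp
  · simp only [ptB]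
    rw [if_neg (by push_cast; omega), if_neg (by push_cast; omega)]

-- ===== VERDICT (by name: the statement is the Claim_ definition above) =====
theorem create_paths_spec : Claim_equal_create_paths := by
  intro d g _
  unfold Spec_create_paths
  obtain ⟨d0, d1⟩ := d
  obtain ⟨g0, g1⟩ := g
  simp only [create_paths, create_paths_alt]
  by_cases h0 : d0 = 0 <;> by_cases h4 : d0 = 450 <;> by_cases h8 : d0 = 800 <;> simp_all
  · -- d0 = 0 : horizontal first, step +1
    rw [B_split true 0 1 d1 d1 (if d1 ≤ g1 then 1 else -1) g0 g0 g1 g0 g1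
      (max 0 g0) (max 0 (if d1 ≤ g1 then g1 - d1 else d1 - g1))
      (Or.inl rfl) (by split_ifs <;> simp) (by omega) (by split_ifs <;> omega)]
    by_cases hg1 : d1 = g1 <;>
      split_ifs <;>
      simp_all [PySem.List.pyRange_one_eq_nil, PySem.List.pyRange_neg_one_eq_nil,
        List.append_assoc] <;> try omega
  · -- d0 = 450 : vertical first, step +1
    rw [B_split false d1 1 450 450 (if 450 ≤ g0 then 1 else -1) g1 g0 g1 g1 g0
      (max 0 (g1 - d1)) (max 0 (if 450 ≤ g0 then g0 - 450 else 450 - g0))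
      (Or.inl rfl) (by split_ifs <;> simp) (by omega) (by split_ifs <;> omega)]
    by_cases hg0 : (450 : Int) = g0 <;>
      split_ifs <;>
      simp_all [PySem.List.pyRange_one_eq_nil, PySem.List.pyRange_neg_one_eq_nil,
        List.append_assoc] <;> try omega
  · -- d0 = 800 : horizontal first, step -1
    rw [B_split true 800 (-1) d1 d1 (if d1 ≤ g1 then 1 else -1) g0 g0 g1 g0 g1
      (max 0 (800 - g0)) (max 0 (if d1 ≤ g1 then g1 - d1 else d1 - g1))
      (Or.inr rfl) (by split_ifs <;> simp) (by omega) (by split_ifs <;> omega)]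
    by_cases hg1 : d1 = g1 <;>
      split_ifs <;>
      simp_all [PySem.List.pyRange_one_eq_nil, PySem.List.pyRange_neg_one_eq_nil,
        List.append_assoc] <;> try omega
  · -- otherwise : vertical first, step -1
    rw [B_split false d1 (-1) d0 d0 (if d0 ≤ g0 then 1 else -1) g1 g0 g1 g1 g0
      (max 0 (d1 - g1)) (max 0 (if d0 ≤ g0 then g0 - d0 else d0 - g0))
      (Or.inr rfl) (by split_ifs <;> simp) (by omega) (by split_ifs <;> omega)]
    by_cases hg0 : d0 = g0 <;>
      split_ifs <;>
      simp_all [PySem.List.pyRange_one_eq_nil, PySem.List.pyRange_neg_one_eq_nil,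
        List.append_assoc] <;> try omega
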